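-- pv_equiv track=rewrite | github.com/frederic-junier/BCPST | TP2/BCPST_852_TP2.py | maxpremier1liste
-- ===== SOURCE A (Python) =====
-- def first1syracuse(u):
--     """affiche le rang du premier 1 dans la suite de syracuse de valeur initiale u(0)=u"""
--     # i contient le rang du terme
--     i = 0
--     while u != 1:
--         i += 1
--         if u%2 == 0:
--             u = u//2
--         else:
--             u = 3*u + 1
--     return i
--
-- def maxpremier1liste(n):
--     """idem mais affiche la liste des u(0) pour lesquels ce maximum est atteint"""
--     L,m = [1],0
--     for v in range(2,n+1):
--         rang = first1syracuse(v)
--         if rang > m: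
--             L= [v]
--             m = rang
--         elif rang == m:
--             L.append(v)
--     return m,L
-- ===== SOURCE B (Python) =====
-- def maxpremier1liste(n):
--     """Collatz: max rank of the first 1 over u0 in 1..n, with list of maximizers.
--     Three-pass map/max/filter formulation instead of A's online accumulator loop."""
--     def steps(u):
--         c = 0
--         while u > 1:
--             u = u // 2 if u % 2 == 0 else 3 * u + 1
--             c += 1
--         return c
--     counts = [(steps(v), v) for v in range(2, n + 1)]
--     if not counts:
--         return 0, [1]
--     m = max(c for c, _ in counts)
--     return m, [v for c, v in counts if c == m]
-- ===== Notes on version B (the rewrite author's own statement) =====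
-- stated objective: alternative
-- what changed: A updates a (list,max) accumulator online with reset/append branches inside one loop; B computes the list of (step-count, v) pairs once, takes the max in a second pass and filters the maximizers in a third (and its inner step count loops on u > 1 instead of u != 1).
import Mathlib
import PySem

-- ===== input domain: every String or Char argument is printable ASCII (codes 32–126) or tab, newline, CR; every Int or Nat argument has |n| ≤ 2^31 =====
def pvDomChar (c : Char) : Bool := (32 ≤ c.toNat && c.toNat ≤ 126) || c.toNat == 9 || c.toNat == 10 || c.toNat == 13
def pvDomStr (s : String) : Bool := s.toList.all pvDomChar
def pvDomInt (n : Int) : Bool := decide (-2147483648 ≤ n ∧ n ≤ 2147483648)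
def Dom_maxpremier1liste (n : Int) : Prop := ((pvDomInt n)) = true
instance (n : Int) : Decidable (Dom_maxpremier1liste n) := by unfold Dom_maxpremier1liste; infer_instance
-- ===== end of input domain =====

-- B replaces A's single online (list, max) accumulator loop by a map / max / filter
-- three-pass formulation (objective: alternative decomposition, same cost).
-- Both Pythons' inner while-loops are ported with the same fixed iteration bound
-- (Collatz termination is not provable); both ports stop the same way at the bound.

-- ===== PORT A =====
def pvFuel : Nat := 100000

-- while u != 1: i += 1; u = u//2 if even else 3*u+1
def pvSyrA : Nat → Int → Int → Int
  | 0, _, i => i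
  | fuel+1, u, i =>
    if u ≠ 1 then
      if PySem.Int.mod u 2 = 0 then pvSyrA fuel (PySem.Int.floordiv u 2) (i + 1)
      else pvSyrA fuel (3 * u + 1) (i + 1)
    else i

def maxpremier1liste (n : Int) : Int × List Int :=
  let st := (PySem.List.pyRange 2 (n + 1) 1).foldl
    (fun (st : List Int × Int) v =>
      let rang := pvSyrA pvFuel v 0
      if rang > st.2 then ([v], rang)
      else if rang = st.2 then (st.1 ++ [v], st.2)
      else st) ([1], 0)
  (st.2, st.1)

-- ===== PORT B =====
-- while u > 1: u = u//2 if even else 3*u+1; c += 1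
def pvSteps : Nat → Int → Int
  | 0, _ => 0
  | fuel+1, u =>
    if u > 1 then
      pvSteps fuel (if PySem.Int.mod u 2 = 0 then PySem.Int.floordiv u 2 else 3 * u + 1) + 1
    else 0

def maxpremier1liste_alt (n : Int) : Int × List Int :=
  let counts := (PySem.List.pyRange 2 (n + 1) 1).map (fun v => (pvSteps pvFuel v, v))
  if counts = [] then (0, [1])
  else
    match PySem.List.max? (counts.map Prod.fst) (fun c => c) with
    | none => (0, [1])   -- unreachable: counts ≠ []
    | some m => (m, (counts.filter (fun p => p.1 == m)).map Prod.snd)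

-- ===== PRECONDITION & SPEC =====
def Spec_maxpremier1liste (n : Int) (out : Int × List Int) : Prop := out = maxpremier1liste_alt n
instance (n : Int) (out : Int × List Int) : Decidable (Spec_maxpremier1liste n out) := by unfold Spec_maxpremier1liste; infer_instance

-- ===== CLAIM (what is proved, stated in full; the proofs are below) =====
def Claim_equal_maxpremier1liste : Prop := ∀ (n : Int), Dom_maxpremier1liste n → Spec_maxpremier1liste n (maxpremier1liste n)

-- ===== LEMMAS AND PROOFS =====

theorem pvSteps_nonneg (f : Nat) (u : Int) : 0 ≤ pvSteps f u := by
  induction f generalizing u with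
  | zero => simp [pvSteps]
  | succ f ih =>
    simp only [pvSteps]
    split
    · have := ih (if PySem.Int.mod u 2 = 0 then PySem.Int.floordiv u 2 else 3 * u + 1)
      omega
    · omega

theorem pvSteps_pos (f : Nat) (u : Int) (hf : 0 < f) (hu : 1 < u) : 1 ≤ pvSteps f u := by
  cases f with
  | zero => omega
  | succ f' =>
    simp only [pvSteps, if_pos hu]
    have := pvSteps_nonneg f' (if PySem.Int.mod u 2 = 0 then PySem.Int.floordiv u 2 else 3 * u + 1)
    omega

-- A's while-with-counter equals i + B's step count, for positive start values
theorem pvSyrA_eq_steps (f : Nat) (u i : Int) (hu : 1 ≤ u) :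
    pvSyrA f u i = i + pvSteps f u := by
  induction f generalizing u i with
  | zero => simp [pvSyrA, pvSteps]
  | succ f ih =>
    by_cases h1 : u = 1
    · subst h1; simp [pvSyrA, pvSteps]
    · have hu2 : 1 < u := lt_of_le_of_ne hu (Ne.symm h1)
      have heven : PySem.Int.mod u 2 = 0 → 1 ≤ PySem.Int.floordiv u 2 := by
        intro _
        rw [PySem.Int.floordiv_eq_ediv_of_pos (by omega)]
        omega
      simp only [pvSyrA, pvSteps, if_pos (show u ≠ 1 from h1), if_pos hu2]
      split
      · next h => rw [ih _ _ (heven h)]; ring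
      · rw [ih _ _ (by omega)]; ring

-- characterization of A's accumulator loop, for an arbitrary rank function g
theorem pvFoldA (g : Int → Int) (xs : List Int) (L : List Int) (m : Int) :
    xs.foldl (fun (st : List Int × Int) v =>
        let rang := g v
        if rang > st.2 then ([v], rang)
        else if rang = st.2 then (st.1 ++ [v], st.2)
        else st) (L, m)
      = ((if xs.foldl (fun a v => max a (g v)) m = m then L else [])
           ++ xs.filter (fun v => g v == xs.foldl (fun a v => max a (g v)) m),
         xs.foldl (fun a v => max a (g v)) m) := by
  induction xs generalizing L m with
  | nil => simp
  | cons v t ih =>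
    simp only [List.foldl_cons]
    rcases lt_trichotomy (g v) m with h | h | h
    · rw [if_neg (by omega), if_neg (by omega), ih]
      have hmax : max m (g v) = m := by omega
      have hle := (PySem.List.le_foldl_max_int t g m).1
      have hne : ¬ (g v = t.foldl (fun a v => max a (g v)) m) := by omega
      simp only [hmax, List.filter_cons, beq_iff_eq, if_neg hne]
    · rw [if_neg (by omega), if_pos h, ih]
      have hmax : max m (g v) = m := by omega
      simp only [hmax] at *
      simp only [List.filter_cons, beq_iff_eq, h]
      by_cases hM : t.foldl (fun a v => max a (g v)) m = m
      · simp [hM]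
      · have hM' : ¬ m = t.foldl (fun a v => max a (g v)) m := fun hh => hM hh.symm
        simp [hM, hM']
    · rw [if_pos h, ih]
      have hmax : max m (g v) = g v := by omega
      have hle := (PySem.List.le_foldl_max_int t g (g v)).1
      have hM : ¬ t.foldl (fun a v => max a (g v)) (g v) = m := by omega
      simp only [hmax, List.filter_cons, beq_iff_eq, if_neg hM]
      by_cases hgv : t.foldl (fun a v => max a (g v)) (g v) = g v
      · simp [hgv]
      · have hgv' : ¬ (g v = t.foldl (fun a v => max a (g v)) (g v)) :=
          fun hh => hgv hh.symm
        simp [hgv, hgv']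

-- filter of a (key, v) tagging, projected back
theorem pvFilterMap (g : Int → Int) (xs : List Int) (m : Int) :
    ((xs.map (fun v => (g v, v))).filter (fun p => p.1 == m)).map Prod.snd
      = xs.filter (fun v => g v == m) := by
  induction xs with
  | nil => rfl
  | cons v t ih =>
    simp only [List.map_cons, List.filter_cons]
    by_cases h : g v == m
    · simp [h, ih]
    · simp [h, ih]

-- ===== VERDICT (by name: the statement is the Claim_ definition above) =====
theorem maxpremier1liste_spec : Claim_equal_maxpremier1liste := by
  intro n _
  unfold Spec_maxpremier1liste maxpremier1liste maxpremier1liste_alt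
  set R := PySem.List.pyRange 2 (n + 1) 1 with hR
  have hmem : ∀ v ∈ R, 2 ≤ v := by
    intro v hv
    exact (PySem.List.mem_pyRange_one.mp (hR ▸ hv)).1
  have hg : ∀ v ∈ R, pvSyrA pvFuel v 0 = pvSteps pvFuel v := by
    intro v hv
    have := pvSyrA_eq_steps pvFuel v 0 (by have := hmem v hv; omega)
    omega
  -- rewrite A's loop to use B's step-count function on the members of R
  have hA : R.foldl (fun (st : List Int × Int) v =>
        let rang := pvSyrA pvFuel v 0
        if rang > st.2 then ([v], rang)
        else if rang = st.2 then (st.1 ++ [v], st.2) else st) ([1], 0)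
      = R.foldl (fun (st : List Int × Int) v =>
        let rang := pvSteps pvFuel v
        if rang > st.2 then ([v], rang)
        else if rang = st.2 then (st.1 ++ [v], st.2) else st) ([1], 0) := by
    apply PySem.List.foldl_congr_mem
    intro acc v hv
    simp only [hg v hv]
  simp only [hA, pvFoldA (fun v => pvSteps pvFuel v) R [1] 0]
  cases hRc : R with
  | nil => simp
  | cons v t =>
    have hv2 : 2 ≤ v := hmem v (by rw [hRc]; exact List.mem_cons_self ..)
    have hv1 : 1 ≤ pvSteps pvFuel v := pvSteps_pos pvFuel v (by norm_num [pvFuel]) (by omega)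
    have h0 := pvSteps_nonneg pvFuel
    -- the two maxima coincide
    have hmax : (v :: t).foldl (fun a w => max a (pvSteps pvFuel w)) 0
        = (t.map (fun w => pvSteps pvFuel w)).foldl max (pvSteps pvFuel v) := by
      rw [List.foldl_cons, List.foldl_map]
      congr 1
      omega
    have hM1 : 1 ≤ (v :: t).foldl (fun a w => max a (pvSteps pvFuel w)) 0 := by
      have := (PySem.List.le_foldl_max_int t (fun w => pvSteps pvFuel w) (max 0 (pvSteps pvFuel v))).1
      simp only [List.foldl_cons]
      omega
    rw [if_neg (by omega)]
    simp only [List.map_cons, List.map_map, Function.comp_def, List.map_cons (f := Prod.fst)]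
    rw [PySem.List.max?_id_cons]
    simp only [List.nil_append]
    rw [if_neg (by simp)]
    rw [← hmax, Prod.mk.injEq]
    refine ⟨rfl, ?_⟩
    rw [show ((pvSteps pvFuel v, v) :: List.map (fun v => (pvSteps pvFuel v, v)) t)
          = List.map (fun w => (pvSteps pvFuel w, w)) (v :: t) from rfl,
        pvFilterMap]
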